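-- pv_equiv track=rewrite | github.com/mennucc/ColDoc_project | ColDoc/utils.py | text_pos2linechar
-- ===== SOURCE A (Python) =====
-- def text_pos2linechar(text, pos):
--     " `pos` is an absolute position in `text` , returns `line` and `char` in line"
--     if isinstance(text, str):
--         text = text.splitlines(keepends=True)
--     line = 0
--     for z in text:
--         l = len(z)
--         if pos < l:
--             return line, pos
--         pos -= l
--         line += 1
--     return line, pos
-- ===== SOURCE B (Python) =====
-- def text_pos2linechar(text, pos):
--     " `pos` is an absolute position in `text` , returns `line` and `char` in line"
--     if isinstance(text, str):
--         text = text.splitlines(keepends=True)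
--     # prefix-sum table: S[k] = total length of the first k lines
--     S = [0]
--     for z in text:
--         S.append(S[-1] + len(z))
--     line = max(0, sum(1 for v in S if v <= pos) - 1)
--     return line, pos - S[line]
-- ===== Notes on version B (the rewrite author's own statement) =====
-- stated objective: alternative
-- what changed: Replaces A's accumulating early-exit scan (decrementing pos line by line) with a prefix-sum table of line lengths: line = max(0, (count of prefix sums <= pos) - 1) and char = pos - S[line].
import Mathlib
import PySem

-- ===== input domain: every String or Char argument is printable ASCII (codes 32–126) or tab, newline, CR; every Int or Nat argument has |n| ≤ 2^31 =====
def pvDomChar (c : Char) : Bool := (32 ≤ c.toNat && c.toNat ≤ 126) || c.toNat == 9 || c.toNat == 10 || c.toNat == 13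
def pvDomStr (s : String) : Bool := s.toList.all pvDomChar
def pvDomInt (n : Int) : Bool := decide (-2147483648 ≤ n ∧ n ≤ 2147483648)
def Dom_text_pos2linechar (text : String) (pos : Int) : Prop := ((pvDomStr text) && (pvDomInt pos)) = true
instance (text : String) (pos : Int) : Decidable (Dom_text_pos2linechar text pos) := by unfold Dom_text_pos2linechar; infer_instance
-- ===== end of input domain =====

-- B replaces A's accumulating early-exit scan by a prefix-sum table of line lengths
-- plus a count of table entries ≤ pos (objective: alternative, same O(n) cost).


-- ===== PORT A =====
-- shared helper: Python's str.splitlines(keepends=True), hand-ported (exact on the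
-- domain's characters: the only line breaks there are '\n', '\r' and "\r\n").
def pySplitlinesKeep (cs : List Char) (acc : List Char) : List (List Char) :=
  match cs with
  | [] => if acc.isEmpty then [] else [acc.reverse]
  | '\r' :: '\n' :: rest2 => (acc.reverse ++ ['\r', '\n']) :: pySplitlinesKeep rest2 []
  | '\r' :: rest => (acc.reverse ++ ['\r']) :: pySplitlinesKeep rest []
  | '\n' :: rest => (acc.reverse ++ ['\n']) :: pySplitlinesKeep rest []
  | c :: rest => pySplitlinesKeep rest (c :: acc)
termination_by cs.length
decreasing_by all_goals (simp only [List.length_cons]; omega)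

-- A's loop: for z in text: l = len(z); if pos < l: return (line, pos); pos -= l; line += 1
def textPosLoopA : List (List Char) → Int → Int → Int × Int
  | [], line, pos => (line, pos)
  | z :: rest, line, pos =>
      if pos < (z.length : Int) then (line, pos)
      else textPosLoopA rest (line + 1) (pos - (z.length : Int))

def text_pos2linechar (text : String) (pos : Int) : Int × Int :=
  textPosLoopA (pySplitlinesKeep text.toList []) 0 pos

-- ===== PORT B =====
def text_pos2linechar_alt (text : String) (pos : Int) : Int × Int :=
  let lines := pySplitlinesKeep text.toList []
  -- S = [0]; for z in text: S.append(S[-1] + len(z))   (S[-1] is always in range)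
  let S : List Int := lines.foldl (fun S z => S ++ [(S.getLast?.getD 0) + (z.length : Int)]) [0]
  -- line = max(0, sum(1 for v in S if v <= pos) - 1)
  let line : Int := max 0 ((S.countP (fun v => decide (v ≤ pos)) : Int) - 1)
  -- S[line]: always in range since 0 ≤ line < len(S)
  (line, pos - ((PySem.List.pyGet? S line).getD 0))

-- ===== PRECONDITION & SPEC =====
def Spec_text_pos2linechar (text : String) (pos : Int) (out : Int × Int) : Prop := out = text_pos2linechar_alt text pos
instance (text : String) (pos : Int) (out : Int × Int) : Decidable (Spec_text_pos2linechar text pos out) := by unfold Spec_text_pos2linechar; infer_instance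

-- ===== CLAIM (what is proved, stated in full; the proofs are below) =====
def Claim_equal_text_pos2linechar : Prop := ∀ (text : String) (pos : Int), Dom_text_pos2linechar text pos → Spec_text_pos2linechar text pos (text_pos2linechar text pos)

-- ===== LEMMAS AND PROOFS =====

-- the prefix-sum list starting at a
def pvSums (a : Int) : List (List Char) → List Int
  | [] => [a]
  | z :: rest => a :: pvSums (a + z.length) rest

theorem pvSums_build (ls : List (List Char)) :
    ∀ (acc : List Int) (a : Int),
      ls.foldl (fun S z => S ++ [(S.getLast?.getD 0) + (z.length : Int)]) (acc ++ [a])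
        = acc ++ pvSums a ls := by
  induction ls with
  | nil => intro acc a; simp [pvSums]
  | cons z rest ih =>
      intro acc a
      have h : ((acc ++ [a]).getLast?.getD 0) = a := by simp
      simp only [List.foldl_cons, h, pvSums]
      have := ih (acc ++ [a]) (a + z.length)
      simpa using this

theorem pvSums_lb (ls : List (List Char)) : ∀ (a : Int), ∀ v ∈ pvSums a ls, a ≤ v := by
  induction ls with
  | nil => intro a v hv; simp [pvSums] at hv; omega
  | cons z rest ih =>
      intro a v hv
      simp only [pvSums, List.mem_cons] at hv
      rcases hv with h | h
      · omega
      · have h1 := ih (a + z.length) v h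
        have h2 : (0:Int) ≤ z.length := Int.natCast_nonneg _
        omega

theorem pvSums_shift (ls : List (List Char)) :
    ∀ (a b : Int), pvSums (a + b) ls = (pvSums b ls).map (a + ·) := by
  induction ls with
  | nil => intro a b; simp [pvSums]
  | cons z rest ih =>
      intro a b
      simp only [pvSums, List.map_cons]
      congr 1
      rw [show a + b + (z.length : Int) = a + (b + z.length) by ring, ih]

theorem pvSums_length (ls : List (List Char)) : ∀ a, (pvSums a ls).length = ls.length + 1 := by
  induction ls with
  | nil => intro a; simp [pvSums]
  | cons z rest ih => intro a; simp [pvSums, ih]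

theorem pvSums_count_zero (ls : List (List Char)) (a pos : Int) (h : pos < a) :
    (pvSums a ls).countP (fun v => decide (v ≤ pos)) = 0 := by
  rw [List.countP_eq_zero]
  intro v hv
  have := pvSums_lb ls a v hv
  simp; omega

theorem pvSums_count_pos (ls : List (List Char)) (a pos : Int) (h : a ≤ pos) :
    1 ≤ (pvSums a ls).countP (fun v => decide (v ≤ pos)) := by
  cases ls with
  | nil => simp [pvSums, h]
  | cons z rest => simp [pvSums, h]

theorem pvSums_count_le (ls : List (List Char)) (a pos : Int) :
    (pvSums a ls).countP (fun v => decide (v ≤ pos)) ≤ ls.length + 1 := by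
  have := List.countP_le_length (l := pvSums a ls) (p := fun v => decide (v ≤ pos))
  rw [pvSums_length] at this; exact this

theorem pvSums_head (ls : List (List Char)) (a : Int) :
    ∃ t, pvSums a ls = a :: t := by
  cases ls <;> exact ⟨_, rfl⟩

theorem pv_getD_map_add (a : Int) (l : List Int) (k : Nat) (h : k < l.length) :
    (l.map (a + ·)).getD k 0 = a + l.getD k 0 := by
  rw [List.getD_eq_getElem?_getD, List.getD_eq_getElem?_getD, List.getElem?_map,
      List.getElem?_eq_getElem h]
  simp

-- A's loop shifts its line counter additively
theorem textPosLoopA_line (ls : List (List Char)) :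
    ∀ (line pos : Int),
      textPosLoopA ls line pos
        = (line + (textPosLoopA ls 0 pos).1, (textPosLoopA ls 0 pos).2) := by
  induction ls with
  | nil => intro line pos; simp [textPosLoopA]
  | cons z rest ih =>
      intro line pos
      simp only [textPosLoopA]
      split
      · simp
      · rw [ih (line + 1), ih (0 + 1)]
        simp only [Prod.mk.injEq]
        exact ⟨by ring, by trivial⟩

theorem textPosLoopA_neg (ls : List (List Char)) (pos : Int) (h : pos < 0) :
    textPosLoopA ls 0 pos = (0, pos) := by
  cases ls with
  | nil => rfl
  | cons z rest =>
      have : pos < (z.length : Int) := by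
        have : (0:Int) ≤ z.length := Int.natCast_nonneg _
        omega
      simp [textPosLoopA, this]

-- main correspondence for nonnegative pos
theorem textPosLoopA_eq_count (ls : List (List Char)) :
    ∀ (pos : Int), 0 ≤ pos →
      textPosLoopA ls 0 pos
        = (((pvSums 0 ls).countP (fun v => decide (v ≤ pos)) : Int) - 1,
           pos - (pvSums 0 ls).getD ((pvSums 0 ls).countP (fun v => decide (v ≤ pos)) - 1) 0) := by
  induction ls with
  | nil =>
      intro pos hpos
      simp [textPosLoopA, pvSums, hpos]
  | cons z rest ih =>
      intro pos hpos
      have hz : pvSums 0 (z :: rest) = 0 :: pvSums ((0:Int) + z.length) rest := rfl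
      simp only [textPosLoopA]
      split
      · -- pos < len z : stop on this line
        rename_i hlt
        rw [hz, show ((0:Int) + z.length) = (z.length : Int) by ring]
        have hc : (pvSums (z.length : Int) rest).countP (fun v => decide (v ≤ pos)) = 0 :=
          pvSums_count_zero rest _ pos hlt
        simp [hc, hpos]
      · -- pos ≥ len z : recurse
        rename_i hge
        rw [Int.not_lt] at hge
        have hpos' : 0 ≤ pos - z.length := by omega
        rw [textPosLoopA_line rest (0 + 1) (pos - z.length), ih (pos - z.length) hpos']
        rw [hz, show ((0:Int) + (z.length:Int)) = (z.length : Int) + 0 by ring,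
            pvSums_shift rest (z.length : Int) 0]
        set S' := pvSums 0 rest with hS'
        have hcmap : ((S'.map ((z.length : Int) + ·)).countP (fun v => decide (v ≤ pos)))
            = S'.countP (fun v => decide (v ≤ pos - z.length)) := by
          rw [List.countP_map]
          apply List.countP_congr
          intro v _
          simp [Function.comp]; omega
        set c' := S'.countP (fun v => decide (v ≤ pos - z.length)) with hc'
        have hc1 : 1 ≤ c' := pvSums_count_pos rest 0 (pos - z.length) hpos'
        have hlen : S'.length = rest.length + 1 := pvSums_length rest 0
        have hcle : c' ≤ rest.length + 1 := pvSums_count_le rest 0 (pos - z.length)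
        have hcount : (0 :: S'.map ((z.length : Int) + ·)).countP (fun v => decide (v ≤ pos)) = c' + 1 := by
          simp [hcmap, hpos]
        rw [hcount]
        simp only [Prod.mk.injEq]
        constructor
        · push_cast; ring
        · have hidx : c' + 1 - 1 = c' := by omega
          rw [hidx]
          obtain ⟨k, hk⟩ : ∃ k, c' = k + 1 := ⟨c' - 1, by omega⟩
          have hkl : k < S'.length := by omega
          rw [hk]
          have : (0 :: S'.map ((z.length : Int) + ·)).getD (k + 1) 0
              = (S'.map ((z.length : Int) + ·)).getD k 0 := rfl
          rw [this, pv_getD_map_add _ _ _ hkl]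
          simp only [Nat.add_sub_cancel]
          ring

-- B's closed expression, for an arbitrary line list
theorem pv_main (ls : List (List Char)) (pos : Int) :
    textPosLoopA ls 0 pos
      = (max 0 (((pvSums 0 ls).countP (fun v => decide (v ≤ pos)) : Int) - 1),
         pos - ((PySem.List.pyGet? (pvSums 0 ls)
             (max 0 (((pvSums 0 ls).countP (fun v => decide (v ≤ pos)) : Int) - 1))).getD 0)) := by
  by_cases hpos : 0 ≤ pos
  · have hc1 : 1 ≤ (pvSums 0 ls).countP (fun v => decide (v ≤ pos)) :=
      pvSums_count_pos ls 0 pos hpos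
    have hclen := pvSums_count_le ls 0 pos
    have hSlen := pvSums_length ls 0
    set c := (pvSums 0 ls).countP (fun v => decide (v ≤ pos)) with hc
    have hmax : max 0 ((c : Int) - 1) = ((c - 1 : Nat) : Int) := by omega
    have hklen : c - 1 < (pvSums 0 ls).length := by omega
    rw [textPosLoopA_eq_count ls pos hpos, hmax, PySem.List.pyGet?_natCast,
        List.getElem?_eq_getElem hklen]
    simp only [Option.getD_some, Prod.mk.injEq]
    refine ⟨by omega, ?_⟩
    rw [List.getD_eq_getElem?_getD, List.getElem?_eq_getElem hklen]
    rfl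
  · have hpos : pos < 0 := Int.not_le.mp hpos
    have hc0 : (pvSums 0 ls).countP (fun v => decide (v ≤ pos)) = 0 :=
      pvSums_count_zero ls 0 pos hpos
    obtain ⟨t, ht⟩ := pvSums_head ls 0
    rw [textPosLoopA_neg ls pos hpos, hc0, ht]
    norm_num

-- ===== VERDICT (by name: the statement is the Claim_ definition above) =====
theorem text_pos2linechar_spec : Claim_equal_text_pos2linechar := by
  intro text pos _
  have hbuild := pvSums_build (pySplitlinesKeep text.toList []) [] 0
  simp only [List.nil_append] at hbuild
  unfold Spec_text_pos2linechar text_pos2linechar text_pos2linechar_alt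
  simp only [hbuild]
  exact pv_main (pySplitlinesKeep text.toList []) pos
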